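-- pv_equiv track=rewrite | github.com/MrBrantCode/unitest_baseline | mut_generate/mist_train_cf/cf_78401/solution.py | arrange_checker
-- ===== SOURCE A (Python) =====
-- def arrange_checker(arr):
--     idx = -1
--     for i in range(len(arr)):
--         for j in range(len(arr) - i - 1):
--             if arr[j] > arr[j+1]:
--                 if idx == -1:
--                     idx = j
--                 arr[j], arr[j+1] = arr[j+1], arr[j]
--     return (idx, arr)
-- ===== SOURCE B (Python) =====
-- def arrange_checker(arr):
--     idx = -1
--     for j in range(len(arr) - 1):
--         if arr[j] > arr[j+1]:
--             idx = j
--             break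
--     arr.sort()
--     return (idx, arr)
-- ===== Notes on version B (the rewrite author's own statement) =====
-- stated objective: faster
-- what changed: Replaces the nested bubble-sort passes (which track the first swap) by one linear scan for the first descent followed by the library in-place sort.
import Mathlib
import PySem

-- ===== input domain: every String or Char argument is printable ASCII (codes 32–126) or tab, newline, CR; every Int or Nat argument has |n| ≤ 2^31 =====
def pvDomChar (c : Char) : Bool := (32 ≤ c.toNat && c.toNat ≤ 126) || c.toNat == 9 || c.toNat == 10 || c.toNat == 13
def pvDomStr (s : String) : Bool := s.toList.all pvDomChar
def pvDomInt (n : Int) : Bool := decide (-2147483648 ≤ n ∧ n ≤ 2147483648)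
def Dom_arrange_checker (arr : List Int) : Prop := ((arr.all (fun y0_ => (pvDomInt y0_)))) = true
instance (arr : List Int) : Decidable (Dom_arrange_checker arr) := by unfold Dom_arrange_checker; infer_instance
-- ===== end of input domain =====

-- B replaces the nested bubble passes by one scan for the first descent plus the library sort
-- (faster); both Pythons mutate arr in place, equivalence here is about the returned pair.

-- ===== PORT A =====
-- one compare-and-swap step of the bubble sort: state = (idx, arr), j the position
def stepA (s : Int × List Int) (j : Int) : Int × List Int :=
  match PySem.List.pyGet? s.2 j, PySem.List.pyGet? s.2 (j + 1) with
  | some x, some y =>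
      if x > y then
        ((if s.1 = -1 then j else s.1),
         PySem.List.pySetD (PySem.List.pySetD s.2 j y) (j + 1) x)
      else s
  | _, _ => s

def arrange_checker (arr : List Int) : Int × List Int :=
  (PySem.List.pyRange 0 (arr.length : Int) 1).foldl
    (fun s i => (PySem.List.pyRange 0 ((s.2.length : Int) - i - 1) 1).foldl stepA s)
    (-1, arr)

-- ===== PORT B =====
-- the scan 'for j in range(len(arr)-1): if arr[j] > arr[j+1]: idx = j; break'
def firstDescAux : List Int → Int → Int
  | x :: y :: rest, pos => if x > y then pos else firstDescAux (y :: rest) (pos + 1)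
  | _, _ => -1

def arrange_checker_alt (arr : List Int) : Int × List Int :=
  (firstDescAux arr 0, PySem.List.sorted arr (fun x => x) false)

-- ===== PRECONDITION & SPEC =====
def Spec_arrange_checker (arr : List Int) (out : Int × List Int) : Prop := out = arrange_checker_alt arr
instance (arr : List Int) (out : Int × List Int) : Decidable (Spec_arrange_checker arr out) := by unfold Spec_arrange_checker; infer_instance

-- ===== CLAIM (what is proved, stated in full; the proofs are below) =====
def Claim_equal_arrange_checker : Prop := ∀ (arr : List Int), Dom_arrange_checker arr → Spec_arrange_checker arr (arrange_checker arr)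

-- ===== LEMMAS AND PROOFS =====

-- structural form of one inner bubble bpass: m comparisons, at positions pos, pos+1, …
def bpass : Nat → Int → Int → List Int → Int × List Int
  | 0, idx, _, l => (idx, l)
  | _ + 1, idx, _, [] => (idx, [])
  | _ + 1, idx, _, [x] => (idx, [x])
  | m + 1, idx, pos, x :: y :: rest =>
      if x > y then
        let r := bpass m (if idx = -1 then pos else idx) (pos + 1) (x :: rest)
        (r.1, y :: r.2)
      else
        let r := bpass m idx (pos + 1) (y :: rest)
        (r.1, x :: r.2)

lemma set_append_len (pre : List Int) (c : Int) (t : List Int) (v : Int) :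
    (pre ++ c :: t).set pre.length v = pre ++ v :: t := by
  induction pre with
  | nil => simp
  | cons a pre ih => simp [ih]

lemma stepA_id (s : Int × List Int) (j : Int) (h : (s.2.length : Int) ≤ j + 1) :
    stepA s j = s := by
  have h2 : PySem.List.pyGet? s.2 (j + 1) = none := by
    rw [PySem.List.pyGet?_eq_none_iff]
    intro hr
    rcases hr with ⟨_, hlt⟩
    omega
  unfold stepA
  rw [h2]
  cases PySem.List.pyGet? s.2 j <;> rfl

lemma foldl_stepA_id (idx : Int) (L : List Int) :
    ∀ (n : Nat) (a b : Int), b - a ≤ (n : Int) → (L.length : Int) ≤ a + 1 →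
      (PySem.List.pyRange a b 1).foldl stepA (idx, L) = (idx, L) := by
  intro n
  induction n with
  | zero =>
    intro a b hb ha
    rw [PySem.List.pyRange_one_eq_nil (by omega)]
    rfl
  | succ n ih =>
    intro a b hb ha
    by_cases hab : b ≤ a
    · rw [PySem.List.pyRange_one_eq_nil hab]; rfl
    · rw [PySem.List.pyRange_one_cons (by omega)]
      simp only [List.foldl_cons]
      rw [stepA_id _ _ (by simpa using ha)]
      exact ih (a + 1) b (by omega) (by omega)

-- stepA applied at the boundary between a processed prefix and the rest
lemma stepA_at (pre : List Int) (x y : Int) (rest : List Int) (idx : Int) :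
    stepA (idx, pre ++ x :: y :: rest) (pre.length : Int) =
      if x > y then
        ((if idx = -1 then (pre.length : Int) else idx), pre ++ y :: x :: rest)
      else (idx, pre ++ x :: y :: rest) := by
  have e : pre ++ x :: y :: rest = (pre ++ [x]) ++ y :: rest := by simp
  have hcast : ((pre.length : Int) + 1) = (((pre ++ [x]).length : Nat) : Int) := by simp
  have hx : PySem.List.pyGet? (pre ++ x :: y :: rest) (pre.length : Int) = some x :=
    PySem.List.pyGet?_append_length pre (y :: rest) x
  have hy : PySem.List.pyGet? (pre ++ x :: y :: rest) ((pre.length : Int) + 1) = some y := by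
    rw [e, hcast]; exact PySem.List.pyGet?_append_length (pre ++ [x]) rest y
  have hset : PySem.List.pySetD
      (PySem.List.pySetD (pre ++ x :: y :: rest) (pre.length : Int) y)
      ((pre.length : Int) + 1) x = pre ++ y :: x :: rest := by
    rw [PySem.List.pySetD_natCast, set_append_len]
    have e2 : pre ++ y :: y :: rest = (pre ++ [y]) ++ y :: rest := by simp
    have hcast2 : ((pre.length : Int) + 1) = (((pre ++ [y]).length : Nat) : Int) := by simp
    rw [e2, hcast2, PySem.List.pySetD_natCast, set_append_len]
    simp
  unfold stepA
  simp only [hx, hy]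
  rw [hset]

-- the inner index fold over positions [pre.length, pre.length + m) is the structural bpass on l
lemma fold_eq_bpass : ∀ (m : Nat) (pre l : List Int) (idx : Int),
    (PySem.List.pyRange (pre.length : Int) ((pre.length : Int) + (m : Int)) 1).foldl
        stepA (idx, pre ++ l)
    = ((bpass m idx (pre.length : Int) l).1, pre ++ (bpass m idx (pre.length : Int) l).2) := by
  intro m
  induction m with
  | zero =>
    intro pre l idx
    rw [PySem.List.pyRange_one_eq_nil (by omega)]
    rfl
  | succ m ih =>
    intro pre l idx
    have hcast1 : (((m + 1 : Nat)) : Int) = (m : Int) + 1 := by push_cast; ring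
    rw [hcast1]
    rw [PySem.List.pyRange_one_cons (by omega)]
    simp only [List.foldl_cons]
    match l with
    | [] =>
      rw [stepA_id (idx, pre ++ []) (pre.length : Int) (by simp)]
      rw [foldl_stepA_id idx (pre ++ []) m ((pre.length : Int) + 1)
          ((pre.length : Int) + ((m : Int) + 1)) (by omega)
          (by simp only [List.length_append, List.length_nil]; push_cast; omega)]
      rfl
    | [x] =>
      rw [stepA_id (idx, pre ++ [x]) (pre.length : Int)
          (by simp only [List.length_append, List.length_nil, List.length_cons]; push_cast; omega)]
      rw [foldl_stepA_id idx (pre ++ [x]) m ((pre.length : Int) + 1)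
          ((pre.length : Int) + ((m : Int) + 1)) (by omega)
          (by simp only [List.length_append, List.length_nil, List.length_cons]; push_cast; omega)]
      rfl
    | x :: y :: rest =>
      rw [stepA_at pre x y rest idx]
      by_cases hgt : x > y
      · rw [if_pos hgt]
        have hbpass : bpass (m + 1) idx (pre.length : Int) (x :: y :: rest)
            = ((bpass m (if idx = -1 then (pre.length : Int) else idx)
                  ((pre.length : Int) + 1) (x :: rest)).1,
               y :: (bpass m (if idx = -1 then (pre.length : Int) else idx)
                  ((pre.length : Int) + 1) (x :: rest)).2) := by
          simp [bpass, hgt]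
        rw [hbpass]
        have hb : (pre.length : Int) + ((m : Int) + 1)
            = (((pre ++ [y]).length : Nat) : Int) + (m : Int) := by
          simp only [List.length_append, List.length_nil, List.length_cons]; push_cast; ring
        have e3 : pre ++ y :: x :: rest = (pre ++ [y]) ++ x :: rest := by simp
        have hcast3 : ((pre.length : Int) + 1) = (((pre ++ [y]).length : Nat) : Int) := by simp
        rw [hb, e3, hcast3, ih (pre ++ [y]) (x :: rest)]
        simp
      · rw [if_neg hgt]
        have hbpass : bpass (m + 1) idx (pre.length : Int) (x :: y :: rest)
            = ((bpass m idx ((pre.length : Int) + 1) (y :: rest)).1,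
               x :: (bpass m idx ((pre.length : Int) + 1) (y :: rest)).2) := by
          simp [bpass, hgt]
        rw [hbpass]
        have hb : (pre.length : Int) + ((m : Int) + 1)
            = (((pre ++ [x]).length : Nat) : Int) + (m : Int) := by
          simp only [List.length_append, List.length_nil, List.length_cons]; push_cast; ring
        have e3 : pre ++ x :: y :: rest = (pre ++ [x]) ++ y :: rest := by simp
        have hcast3 : ((pre.length : Int) + 1) = (((pre ++ [x]).length : Nat) : Int) := by simp
        rw [hb, e3, hcast3, ih (pre ++ [x]) (y :: rest)]
        simp

lemma bpass_perm : ∀ (m : Nat) (idx pos : Int) (l : List Int), (bpass m idx pos l).2.Perm l := by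
  intro m
  induction m with
  | zero => intro idx pos l; simp [bpass]
  | succ m ih =>
    intro idx pos l
    match l with
    | [] => simp [bpass]
    | [x] => simp [bpass]
    | x :: y :: rest =>
      by_cases hgt : x > y
      · simp only [bpass, hgt, if_pos]
        refine List.Perm.trans (List.Perm.cons y (ih _ _ (x :: rest))) ?_
        exact List.Perm.swap x y rest
      · simp only [bpass, hgt, if_false]
        exact List.Perm.cons x (ih _ _ (y :: rest))

lemma bpass_length (m : Nat) (idx pos : Int) (l : List Int) :
    (bpass m idx pos l).2.length = l.length :=
  (bpass_perm m idx pos l).length_eq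

lemma bpass_keep_idx : ∀ (m : Nat) (idx pos : Int) (l : List Int), idx ≠ -1 →
    (bpass m idx pos l).1 = idx := by
  intro m
  induction m with
  | zero => intro idx pos l h; simp [bpass]
  | succ m ih =>
    intro idx pos l h
    match l with
    | [] => simp [bpass]
    | [x] => simp [bpass]
    | x :: y :: rest =>
      by_cases hgt : x > y
      · simp only [bpass, hgt, if_pos, if_neg h]
        exact ih idx _ (x :: rest) h
      · simp only [bpass, hgt, if_false]
        exact ih idx _ (y :: rest) h

lemma bpass_sorted : ∀ (m : Nat) (idx pos : Int) (l : List Int), l.Pairwise (· ≤ ·) →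
    bpass m idx pos l = (idx, l) := by
  intro m
  induction m with
  | zero => intro idx pos l h; simp [bpass]
  | succ m ih =>
    intro idx pos l h
    match l with
    | [] => simp [bpass]
    | [x] => simp [bpass]
    | x :: y :: rest =>
      have hxy : x ≤ y := (List.pairwise_cons.1 h).1 y (by simp)
      have htl : (y :: rest).Pairwise (· ≤ ·) := (List.pairwise_cons.1 h).2
      simp [bpass, not_lt.2 hxy, ih idx (pos + 1) (y :: rest) htl]

-- after a full first bpass the recorded idx is the first descent of the original list
lemma bpass_fst : ∀ (l : List Int) (m : Nat) (pos : Int), l.length ≤ m + 1 → 0 ≤ pos →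
    (bpass m (-1) pos l).1 = firstDescAux l pos := by
  intro l
  induction l with
  | nil => intro m pos _ _; cases m <;> simp [bpass, firstDescAux]
  | cons x t iht =>
    intro m pos hm hpos
    match t, m with
    | [], m => cases m <;> simp [bpass, firstDescAux]
    | y :: rest, m + 1 =>
      by_cases hgt : x > y
      · have hk := bpass_keep_idx m pos (pos + 1) (x :: rest) (by omega)
        simp [bpass, firstDescAux, hgt, hk]
      · simp only [bpass, hgt, if_false, firstDescAux]
        exact iht m (pos + 1) (by simp at hm ⊢; omega) (by omega)

lemma firstDescAux_eq_neg_one_iff : ∀ (l : List Int) (pos : Int), 0 ≤ pos →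
    (firstDescAux l pos = -1 ↔ l.Pairwise (· ≤ ·)) := by
  intro l
  induction l with
  | nil => intro pos _; simp [firstDescAux]
  | cons x t iht =>
    intro pos hpos
    match t with
    | [] => simp [firstDescAux]
    | y :: rest =>
      by_cases hgt : x > y
      · simp only [firstDescAux, hgt, if_pos]
        constructor
        · intro h; omega
        · intro h
          exact absurd ((List.pairwise_cons.1 h).1 y (by simp)) (by omega)
      · simp only [firstDescAux, hgt, if_false]
        rw [iht (pos + 1) (by omega)]
        constructor
        · intro h
          refine List.pairwise_cons.2 ⟨?_, h⟩
          intro b hb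
          rcases List.mem_cons.1 hb with rfl | hb
          · omega
          · exact le_trans (by omega) ((List.pairwise_cons.1 h).1 b hb)
        · intro h; exact (List.pairwise_cons.1 h).2

-- a bpass of m comparisons never looks past the first m+1 elements
lemma bpass_split : ∀ (m : Nat) (front back : List Int) (idx pos : Int),
    m + 1 ≤ front.length →
    bpass m idx pos (front ++ back)
      = ((bpass m idx pos front).1, (bpass m idx pos front).2 ++ back) := by
  intro m
  induction m with
  | zero => intro front back idx pos _; simp [bpass]
  | succ m ih =>
    intro front back idx pos hlen
    match front with
    | [] => simp at hlen
    | [x] => simp at hlen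
    | x :: y :: f =>
      by_cases hgt : x > y
      · simp only [List.cons_append, bpass, hgt, if_pos]
        rw [show x :: (f ++ back) = (x :: f) ++ back from rfl,
            ih (x :: f) back _ (pos + 1) (by simp at hlen ⊢; omega)]
      · simp only [List.cons_append, bpass, hgt, if_false]
        rw [show y :: (f ++ back) = (y :: f) ++ back from rfl,
            ih (y :: f) back idx (pos + 1) (by simp at hlen ⊢; omega)]

-- a full bpass over l pushes a maximum of l to the last position
lemma bpass_bubbles_max : ∀ (m : Nat) (l : List Int) (idx pos : Int),
    l ≠ [] → l.length ≤ m + 1 →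
    ∃ t M, (bpass m idx pos l).2 = t ++ [M] ∧ (∀ a ∈ t, a ≤ M) := by
  intro m
  induction m with
  | zero =>
    intro l idx pos hne hm
    match l, hne, hm with
    | [x], _, _ => exact ⟨[], x, by simp [bpass], by simp⟩
  | succ m ih =>
    intro l idx pos hne hm
    match l with
    | [x] => exact ⟨[], x, by simp [bpass], by simp⟩
    | x :: y :: rest =>
      by_cases hgt : x > y
      · obtain ⟨t', M, ht', hle⟩ := ih (x :: rest) (if idx = -1 then pos else idx) (pos + 1)
          (by simp) (by simp at hm ⊢; omega)
        have hmemx : x ∈ t' ++ [M] := by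
          rw [← ht']; exact (bpass_perm m _ _ (x :: rest)).symm.mem_iff.1 (by simp)
        have hxM : x ≤ M := by
          rcases List.mem_append.1 hmemx with h | h
          · exact hle x h
          · simp at h; omega
        refine ⟨y :: t', M, ?_, ?_⟩
        · simp only [bpass, hgt, if_pos, ht']; rfl
        · intro a ha
          rcases List.mem_cons.1 ha with rfl | ha
          · omega
          · exact hle a ha
      · obtain ⟨t', M, ht', hle⟩ := ih (y :: rest) idx (pos + 1)
          (by simp) (by simp at hm ⊢; omega)
        have hmemy : y ∈ t' ++ [M] := by
          rw [← ht']; exact (bpass_perm m _ _ (y :: rest)).symm.mem_iff.1 (by simp)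
        have hyM : y ≤ M := by
          rcases List.mem_append.1 hmemy with h | h
          · exact hle y h
          · simp at h; omega
        refine ⟨x :: t', M, ?_, ?_⟩
        · simp only [bpass, hgt, if_false, ht']; rfl
        · intro a ha
          rcases List.mem_cons.1 ha with rfl | ha
          · omega
          · exact hle a ha

-- the outer loop's state after i passes
def outerStep (s : Int × List Int) (i : Int) : Int × List Int :=
  (PySem.List.pyRange 0 ((s.2.length : Int) - i - 1) 1).foldl stepA s

def S (arr : List Int) (i : Nat) : Int × List Int :=
  (PySem.List.pyRange 0 (i : Int) 1).foldl outerStep (-1, arr)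

lemma arrange_checker_eq_S (arr : List Int) : arrange_checker arr = S arr arr.length := rfl

lemma S_succ (arr : List Int) (i : Nat) :
    S arr (i + 1) = outerStep (S arr i) (i : Int) := by
  unfold S
  have h : (((i + 1 : Nat)) : Int) = (i : Int) + 1 := by push_cast; ring
  rw [h, PySem.List.pyRange_one_succ_right (by positivity), List.foldl_append]
  rfl

-- inner fold on the whole list (pre = []) with a nonnegative bound b is bpass (b.toNat)
lemma outerStep_eq_bpass (s : Int × List Int) (i : Int) (m : Nat)
    (hm : (s.2.length : Int) - i - 1 = (m : Int)) :
    outerStep s i = bpass m s.1 0 s.2 := by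
  unfold outerStep
  rw [hm]
  have := fold_eq_bpass m [] s.2 s.1
  simpa using this


-- the list invariant of the outer loop: after i passes the list splits into a front of
-- length n-i and a sorted back dominating the front, and stays a permutation of arr
lemma S_inv (arr : List Int) : ∀ (i : Nat), i ≤ arr.length →
    ∃ F B, (S arr i).2 = F ++ B ∧ F.length = arr.length - i ∧
      B.Pairwise (· ≤ ·) ∧ (∀ a ∈ F, ∀ b ∈ B, a ≤ b) ∧ (S arr i).2.Perm arr := by
  intro i
  induction i with
  | zero =>
    intro _
    exact ⟨arr, [], by simp [S], by simp, by simp, by simp, by simp [S]⟩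
  | succ i ih =>
    intro hi
    obtain ⟨F, B, hFB, hFlen, hBsorted, hdom, hperm⟩ := ih (by omega)
    have hn : (S arr i).2.length = arr.length := hperm.length_eq
    have hF : 1 ≤ F.length := by omega
    have hm : ((S arr i).2.length : Int) - (i : Int) - 1 = ((F.length - 1 : Nat) : Int) := by
      rw [hn]; omega
    rw [S_succ, outerStep_eq_bpass _ _ _ hm]
    have hsplit := bpass_split (F.length - 1) F B (S arr i).1 0 (by omega)
    obtain ⟨t, M, ht, hle⟩ :=
      bpass_bubbles_max (F.length - 1) F (S arr i).1 0 (by rintro rfl; simp at hF) (by omega)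
    have hpermF : (bpass (F.length - 1) (S arr i).1 0 F).2.Perm F := bpass_perm _ _ _ F
    have hMF : M ∈ F := hpermF.mem_iff.1 (by rw [ht]; simp)
    have htF : ∀ a ∈ t, a ∈ F := by
      intro a ha; exact hpermF.mem_iff.1 (by rw [ht]; simp [ha])
    refine ⟨t, M :: B, ?_, ?_, ?_, ?_, ?_⟩
    · rw [hFB] at *; rw [hsplit]; rw [ht]; simp
    · have hl := bpass_length (F.length - 1) (S arr i).1 0 F
      rw [ht] at hl; simp at hl; omega
    · refine List.pairwise_cons.2 ⟨?_, hBsorted⟩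
      intro b hb; exact hdom M hMF b hb
    · intro a ha b hb
      rcases List.mem_cons.1 hb with rfl | hb
      · exact hle a ha
      · exact hdom a (htF a ha) b hb
    · rw [hFB] at *; rw [hsplit, ht]
      have h1 : (t ++ [M]).Perm F := hpermF.symm.trans (by rw [ht]) |>.symm
      have h2 : ((t ++ [M]) ++ B).Perm (F ++ B) := h1.append_right B
      exact h2.trans hperm

-- in the sorted case every bpass is the identity and idx stays -1
lemma S_of_sorted (arr : List Int) (h : arr.Pairwise (· ≤ ·)) :
    ∀ i : Nat, S arr i = (-1, arr) := by
  intro i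
  induction i with
  | zero => simp [S]
  | succ i ih =>
    rw [S_succ, ih]
    have hm : ((arr.length : Int) - (i : Int) - 1) = ((arr.length : Int) - (i : Int) - 1) := rfl
    by_cases hpos : 0 ≤ (arr.length : Int) - (i : Int) - 1
    · rw [outerStep_eq_bpass ((-1 : Int), arr) i (((arr.length : Int) - (i : Int) - 1).toNat)
          (by simp; omega)]
      exact bpass_sorted _ _ _ _ h
    · unfold outerStep
      rw [PySem.List.pyRange_one_eq_nil (by simp at hpos ⊢; omega)]
      rfl

-- in the unsorted case idx becomes the first descent after bpass 1 and then never changes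
lemma S_fst_of_unsorted (arr : List Int) (h : ¬ arr.Pairwise (· ≤ ·)) :
    ∀ i : Nat, 1 ≤ i → (S arr i).1 = firstDescAux arr 0 := by
  have hfd : firstDescAux arr 0 ≠ -1 := by
    intro hc; exact h ((firstDescAux_eq_neg_one_iff arr 0 (by omega)).1 hc)
  have hlen : 2 ≤ arr.length := by
    match arr, h with
    | [], h => exact absurd (by simp) h
    | [x], h => exact absurd (by simp) h
    | x :: y :: t, _ => simp
  intro i
  induction i with
  | zero => omega
  | succ i ih =>
    intro _
    by_cases hi : 1 ≤ i
    · rw [S_succ]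
      have hprev := ih hi
      by_cases hpos : 0 ≤ ((S arr i).2.length : Int) - (i : Int) - 1
      · rw [outerStep_eq_bpass (S arr i) i (((S arr i).2.length : Int) - (i : Int) - 1).toNat
            (by omega)]
        rw [bpass_keep_idx _ _ _ _ (by rw [hprev]; exact hfd)]
        exact hprev
      · unfold outerStep
        rw [PySem.List.pyRange_one_eq_nil (by omega)]
        exact hprev
    · have hi0 : i = 0 := by omega
      subst hi0
      rw [S_succ]
      have hS0 : S arr 0 = (-1, arr) := by simp [S]
      rw [hS0]
      simp only [Nat.cast_zero]
      rw [outerStep_eq_bpass ((-1 : Int), arr) 0 (arr.length - 1)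
          (by simp; omega)]
      exact bpass_fst arr (arr.length - 1) 0 (by omega) (by omega)

-- ===== VERDICT (by name: the statement is the Claim_ definition above) =====
theorem arrange_checker_spec : Claim_equal_arrange_checker := by
  intro arr _
  show arrange_checker arr = arrange_checker_alt arr
  rw [arrange_checker_eq_S]
  unfold arrange_checker_alt
  by_cases hs : arr.Pairwise (· ≤ ·)
  · rw [S_of_sorted arr hs]
    have h1 : firstDescAux arr 0 = -1 := (firstDescAux_eq_neg_one_iff arr 0 (by omega)).2 hs
    have h2 : PySem.List.sorted arr (fun x => x) false = arr :=
      PySem.List.sorted_eq_self_of_pairwise arr (fun x => x) hs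
    rw [h1, h2]
  · have hlen : 2 ≤ arr.length := by
      match arr, hs with
      | [], h => exact absurd (by simp) h
      | [x], h => exact absurd (by simp) h
      | x :: y :: t, _ => simp
    obtain ⟨F, B, hFB, hFlen, hBsorted, hdom, hperm⟩ := S_inv arr arr.length (le_refl _)
    have hFnil : F = [] := List.length_eq_zero_iff.1 (by omega)
    subst hFnil
    simp only [List.nil_append] at hFB
    have hpermB : B.Perm arr := hFB ▸ hperm
    have hsnd : (S arr arr.length).2 = PySem.List.sorted arr (fun x => x) false := by
      rw [hFB]
      exact (PySem.List.sorted_id_eq_of_perm_of_pairwise arr B hpermB hBsorted).symm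
    have hfst : (S arr arr.length).1 = firstDescAux arr 0 :=
      S_fst_of_unsorted arr hs arr.length (by omega)
    exact Prod.ext hfst hsnd
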